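-- pv_equiv track=rewrite | github.com/HomericIntelligence/ProjectHephaestus | hephaestus/discovery/skills.py | get_skill_category
-- ===== SOURCE A (Python) =====
-- def get_skill_category(
--     skill_name: str,
--     category_mappings: dict[str, list[str]] | None = None,
-- ) -> str:
--     """Determine the category for *skill_name*.
--
--     First checks *category_mappings* for an explicit entry, then tries
--     well-known prefix conventions (``gh-``, ``mojo-``, ``phase-``, etc.).
--     Falls back to ``"other"`` when no match is found.
--
--     Args:
--         skill_name: Skill directory or file name (without ``.md`` extension).
--         category_mappings: Optional ``{category: [skill_name, ...]}`` dict.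
--
--     Returns:
--         Category string.
--
--     """
--     if category_mappings:
--         for category, skills in category_mappings.items():
--             if skill_name in skills:
--                 return category
--
--     # Prefix-based fallback
--     prefix_map: list[tuple[str, str]] = [
--         ("gh-", "github"),
--         ("mojo-", "mojo"),
--         ("phase-", "workflow"),
--         ("quality-", "quality"),
--         ("worktree-", "worktree"),
--         ("doc-", "documentation"),
--         ("agent-", "agent"),
--     ]
--     for prefix, category in prefix_map:
--         if skill_name.startswith(prefix):
--             return category
--
--     return "other"
-- ===== SOURCE B (Python) =====
-- _PREFIX_TO_CAT = {
--     "gh-": "github",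
--     "mojo-": "mojo",
--     "phase-": "workflow",
--     "quality-": "quality",
--     "worktree-": "worktree",
--     "doc-": "documentation",
--     "agent-": "agent",
-- }
--
--
-- def get_skill_category(
--     skill_name: str,
--     category_mappings: dict[str, list[str]] | None = None,
-- ) -> str:
--     """Determine the category for *skill_name* (table-lookup variant)."""
--     if category_mappings:
--         for category, skills in category_mappings.items():
--             if skill_name in skills:
--                 return category
--     head, sep, _tail = skill_name.partition("-")
--     if sep:
--         return _PREFIX_TO_CAT.get(head + "-", "other")
--     return "other"
-- ===== Notes on version B (the rewrite author's own statement) =====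
-- stated objective: idiomatic
-- what changed: The 7-way linear startswith scan is replaced by partitioning the name at its first hyphen and doing a single computed-key lookup in a prefix-to-category dict.
import Mathlib
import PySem

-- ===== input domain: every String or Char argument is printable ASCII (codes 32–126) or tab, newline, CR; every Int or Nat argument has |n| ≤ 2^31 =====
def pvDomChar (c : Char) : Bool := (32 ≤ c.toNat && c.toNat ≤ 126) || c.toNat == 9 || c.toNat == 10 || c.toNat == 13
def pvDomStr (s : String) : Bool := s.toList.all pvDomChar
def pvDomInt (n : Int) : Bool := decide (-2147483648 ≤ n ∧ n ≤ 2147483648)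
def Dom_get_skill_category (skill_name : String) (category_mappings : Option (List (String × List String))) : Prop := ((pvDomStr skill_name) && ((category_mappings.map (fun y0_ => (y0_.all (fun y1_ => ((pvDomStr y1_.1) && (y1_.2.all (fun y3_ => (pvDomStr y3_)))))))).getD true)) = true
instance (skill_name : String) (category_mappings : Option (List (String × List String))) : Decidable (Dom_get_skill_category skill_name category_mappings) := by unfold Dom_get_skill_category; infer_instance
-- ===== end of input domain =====

-- B replaces A's 7-way linear startswith scan by a partition at the first hyphen
-- plus a single computed-key lookup in a prefix→category dict (idiomatic; same cost class).


-- ===== PORT A =====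
-- 'for category, skills in category_mappings.items(): if skill_name in skills: return category'
def pvA_mapLoop (skill_name : String) : List (String × List String) → Option String
  | [] => none
  | (category, skills) :: rest =>
      if skill_name ∈ skills then some category else pvA_mapLoop skill_name rest

-- 'for prefix, category in prefix_map: if skill_name.startswith(prefix): return category'
def pvA_prefixLoop (skill_name : String) : List (String × String) → Option String
  | [] => none
  | (pre, category) :: rest =>
      if PySem.Str.startswith skill_name pre then some category else pvA_prefixLoop skill_name rest

def get_skill_category (skill_name : String) (category_mappings : Option (List (String × List String))) : String :=
  let fromMappings : Option String :=
    match category_mappings with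
    | some l => if l.isEmpty then none else pvA_mapLoop skill_name l  -- 'if category_mappings:' truthiness
    | none => none
  match fromMappings with
  | some category => category
  | none =>
    match pvA_prefixLoop skill_name
        [("gh-", "github"), ("mojo-", "mojo"), ("phase-", "workflow"), ("quality-", "quality"),
         ("worktree-", "worktree"), ("doc-", "documentation"), ("agent-", "agent")] with
    | some category => category
    | none => "other"

-- ===== PORT B =====
def pvB_prefixDict : PySem.Dict String String :=
  PySem.Dict.mk
    [("gh-", "github"), ("mojo-", "mojo"), ("phase-", "workflow"), ("quality-", "quality"),
     ("worktree-", "worktree"), ("doc-", "documentation"), ("agent-", "agent")]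

-- same mappings loop as Source B keeps
def pvB_mapLoop (skill_name : String) : List (String × List String) → Option String
  | [] => none
  | (category, skills) :: rest =>
      if skill_name ∈ skills then some category else pvB_mapLoop skill_name rest

def get_skill_category_alt (skill_name : String) (category_mappings : Option (List (String × List String))) : String :=
  let fromMappings : Option String :=
    match category_mappings with
    | some l => if l.isEmpty then none else pvB_mapLoop skill_name l
    | none => none
  match fromMappings with
  | some category => category
  | none =>
    -- skill_name.partition("-"): head = chars before the first '-', sep nonempty iff '-' occurs (hand port, exact)
    let head : List Char := skill_name.toList.takeWhile (fun c => c ≠ '-')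
    if PySem.Str.isIn "-" skill_name then
      pvB_prefixDict.getD (String.ofList (head ++ ['-'])) "other"
    else "other"

-- ===== PRECONDITION & SPEC =====
def Spec_get_skill_category (skill_name : String) (category_mappings : Option (List (String × List String))) (out : String) : Prop := out = get_skill_category_alt skill_name category_mappings
instance (skill_name : String) (category_mappings : Option (List (String × List String))) (out : String) : Decidable (Spec_get_skill_category skill_name category_mappings out) := by unfold Spec_get_skill_category; infer_instance

-- ===== CLAIM (what is proved, stated in full; the proofs are below) =====
def Claim_equal_get_skill_category : Prop := ∀ (skill_name : String) (category_mappings : Option (List (String × List String))), Dom_get_skill_category skill_name category_mappings → Spec_get_skill_category skill_name category_mappings (get_skill_category skill_name category_mappings)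

-- ===== LEMMAS AND PROOFS =====

lemma pv_mapLoop_eq (s : String) (l : List (String × List String)) :
    pvA_mapLoop s l = pvB_mapLoop s l := by
  induction l with
  | nil => rfl
  | cons p rest ih => cases p; simp [pvA_mapLoop, pvB_mapLoop, ih]

lemma pv_singleton_infix {a : Char} {l : List Char} (h : [a] <:+: l) : a ∈ l := by
  rcases h with ⟨s, t, rfl⟩; simp

lemma pv_dash_prefix_iff (x : List Char) (l : List Char) (hx : '-' ∉ x) (hl : '-' ∈ l) :
    ((x ++ ['-']) <+: l ↔ l.takeWhile (fun c => c ≠ '-') = x) := by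
  induction x generalizing l with
  | nil =>
    cases l with
    | nil => simp at hl
    | cons c t =>
      by_cases hc : c = '-'
      · subst hc; simp
      · simp [hc]
        intro h; exact absurd h.symm hc
  | cons a x' ih =>
    have ha : a ≠ '-' := by rintro rfl; exact hx (by simp)
    have hx' : '-' ∉ x' := by intro h; exact hx (by simp [h])
    cases l with
    | nil => simp at hl
    | cons c t =>
      by_cases hc : c = '-'
      · subst hc
        constructor
        · rintro ⟨r, hr⟩
          simp at hr
          exact absurd hr.1 ha
        · intro h
          simp at h
      · have hlt : '-' ∈ t := by
          rcases List.mem_cons.mp hl with h | h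
          · exact absurd h.symm hc
          · exact h
        constructor
        · rintro ⟨r, hr⟩
          simp at hr
          obtain ⟨hac, ht⟩ := hr
          subst hac
          have hpre : (x' ++ ['-']) <+: t := ⟨r, by simpa using ht⟩
          have htw := (ih t hx' hlt).mp hpre
          simp only [ne_eq, decide_not] at htw
          simp [hc, htw]
        · intro h
          simp [hc] at h
          obtain ⟨hac, htw⟩ := h
          subst hac
          simp only [ne_eq, decide_not] at ih
          rcases (ih t hx' hlt).mpr htw with ⟨r, hr⟩
          exact ⟨r, by simp [← hr]⟩

lemma pv_sw_iff (s : String) (x : List Char) (hx : '-' ∉ x) (hl : '-' ∈ s.toList) :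
    (PySem.Str.startswith s (String.ofList (x ++ ['-'])) = true ↔ s.toList.takeWhile (fun c => c ≠ '-') = x) := by
  rw [PySem.Str.startswith_eq]
  simp only [String.toList_ofList]
  rw [PySem.Chars.startswith_iff]
  exact pv_dash_prefix_iff x s.toList hx hl

lemma pv_sw_false_no_dash (s p : String) (hin : '-' ∉ s.toList) (hp : '-' ∈ p.toList) :
    PySem.Str.startswith s p = false := by
  by_contra h
  have h' : PySem.Str.startswith s p = true := by
    cases hb : PySem.Str.startswith s p
    · exact absurd hb h
    · rfl
  rw [PySem.Str.startswith_eq, PySem.Chars.startswith_iff] at h'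
  exact hin (h'.sublist.mem hp)

lemma pv_sw_lit (s p x : String) (hpx : p = String.ofList (x.toList ++ ['-']))
    (hx : '-' ∉ x.toList) (hin : '-' ∈ s.toList) :
    (PySem.Str.startswith s p = true ↔ s.toList.takeWhile (fun c => c ≠ '-') = x.toList) :=
  hpx ▸ pv_sw_iff s x.toList hx hin

lemma pv_key_ne (tw : List Char) (x p : String) (hpx : p = String.ofList (x.toList ++ ['-']))
    (hne : tw ≠ x.toList) : (String.ofList tw ++ "-") ≠ p := by
  subst hpx
  intro h
  have h2 : tw ++ ['-'] = x.toList ++ ['-'] := by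
    have := congrArg String.toList h
    simpa using this
  exact hne (by simpa using h2)

lemma pv_fallback_eq (s : String) :
    (match pvA_prefixLoop s
        [("gh-", "github"), ("mojo-", "mojo"), ("phase-", "workflow"), ("quality-", "quality"),
         ("worktree-", "worktree"), ("doc-", "documentation"), ("agent-", "agent")] with
     | some category => category
     | none => "other")
    = (if PySem.Str.isIn "-" s then
         pvB_prefixDict.getD (String.ofList ((s.toList.takeWhile (fun c => c ≠ '-')) ++ ['-'])) "other"
       else "other") := by
  by_cases hin : '-' ∈ s.toList
  · have hisin : PySem.Chars.isIn ['-'] s.toList = true := by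
      rw [PySem.Chars.isIn_iff_infix]
      rcases List.append_of_mem hin with ⟨l1, l2, hl⟩
      exact ⟨l1, l2, by simp [hl]⟩
    have h1 := pv_sw_lit s "gh-" "gh" (by decide) (by decide) hin
    have h2 := pv_sw_lit s "mojo-" "mojo" (by decide) (by decide) hin
    have h3 := pv_sw_lit s "phase-" "phase" (by decide) (by decide) hin
    have h4 := pv_sw_lit s "quality-" "quality" (by decide) (by decide) hin
    have h5 := pv_sw_lit s "worktree-" "worktree" (by decide) (by decide) hin
    have h6 := pv_sw_lit s "doc-" "doc" (by decide) (by decide) hin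
    have h7 := pv_sw_lit s "agent-" "agent" (by decide) (by decide) hin
    simp at h1 h2 h3 h4 h5 h6 h7
    by_cases e1 : List.takeWhile (fun c => !decide (c = '-')) s.toList = "gh".toList
    · simp [pvA_prefixLoop, h1.mpr e1, hisin, e1]; decide
    · have f1 := Bool.eq_false_iff.mpr (fun h => e1 (h1.mp h))
      by_cases e2 : List.takeWhile (fun c => !decide (c = '-')) s.toList = "mojo".toList
      · simp [pvA_prefixLoop, f1, h2.mpr e2, hisin, e2]; decide
      · have f2 := Bool.eq_false_iff.mpr (fun h => e2 (h2.mp h))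
        by_cases e3 : List.takeWhile (fun c => !decide (c = '-')) s.toList = "phase".toList
        · simp [pvA_prefixLoop, f1, f2, h3.mpr e3, hisin, e3]; decide
        · have f3 := Bool.eq_false_iff.mpr (fun h => e3 (h3.mp h))
          by_cases e4 : List.takeWhile (fun c => !decide (c = '-')) s.toList = "quality".toList
          · simp [pvA_prefixLoop, f1, f2, f3, h4.mpr e4, hisin, e4]; decide
          · have f4 := Bool.eq_false_iff.mpr (fun h => e4 (h4.mp h))
            by_cases e5 : List.takeWhile (fun c => !decide (c = '-')) s.toList = "worktree".toList
            · simp [pvA_prefixLoop, f1, f2, f3, f4, h5.mpr e5, hisin, e5]; decide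
            · have f5 := Bool.eq_false_iff.mpr (fun h => e5 (h5.mp h))
              by_cases e6 : List.takeWhile (fun c => !decide (c = '-')) s.toList = "doc".toList
              · simp [pvA_prefixLoop, f1, f2, f3, f4, f5, h6.mpr e6, hisin, e6]; decide
              · have f6 := Bool.eq_false_iff.mpr (fun h => e6 (h6.mp h))
                by_cases e7 : List.takeWhile (fun c => !decide (c = '-')) s.toList = "agent".toList
                · simp [pvA_prefixLoop, f1, f2, f3, f4, f5, f6, h7.mpr e7, hisin, e7]; decide
                · have f7 := Bool.eq_false_iff.mpr (fun h => e7 (h7.mp h))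
                  have k1 := pv_key_ne _ "gh" "gh-" (by decide) e1
                  have k2 := pv_key_ne _ "mojo" "mojo-" (by decide) e2
                  have k3 := pv_key_ne _ "phase" "phase-" (by decide) e3
                  have k4 := pv_key_ne _ "quality" "quality-" (by decide) e4
                  have k5 := pv_key_ne _ "worktree" "worktree-" (by decide) e5
                  have k6 := pv_key_ne _ "doc" "doc-" (by decide) e6
                  have k7 := pv_key_ne _ "agent" "agent-" (by decide) e7
                  simp [pvA_prefixLoop, f1, f2, f3, f4, f5, f6, f7, hisin, pvB_prefixDict,
                        PySem.Dict.getD, PySem.Dict.get?,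
                        Ne.symm k1, Ne.symm k2, Ne.symm k3, Ne.symm k4, Ne.symm k5,
                        Ne.symm k6, Ne.symm k7]
  · have hisin : PySem.Chars.isIn ['-'] s.toList = false := by
      rw [Bool.eq_false_iff]
      intro h
      rw [PySem.Chars.isIn_iff_infix] at h
      exact hin (pv_singleton_infix h)
    have f1 := pv_sw_false_no_dash s "gh-" hin (by decide)
    have f2 := pv_sw_false_no_dash s "mojo-" hin (by decide)
    have f3 := pv_sw_false_no_dash s "phase-" hin (by decide)
    have f4 := pv_sw_false_no_dash s "quality-" hin (by decide)
    have f5 := pv_sw_false_no_dash s "worktree-" hin (by decide)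
    have f6 := pv_sw_false_no_dash s "doc-" hin (by decide)
    have f7 := pv_sw_false_no_dash s "agent-" hin (by decide)
    simp at f1 f2 f3 f4 f5 f6 f7
    simp [pvA_prefixLoop, f1, f2, f3, f4, f5, f6, f7, hisin]

-- ===== VERDICT (by name: the statement is the Claim_ definition above) =====
theorem get_skill_category_spec : Claim_equal_get_skill_category := by
  intro s cm _
  unfold Spec_get_skill_category get_skill_category get_skill_category_alt
  simp only [pv_mapLoop_eq]
  have hf := pv_fallback_eq s
  cases cm with
  | none => simpa using hf
  | some l =>
    by_cases hl : l.isEmpty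
    · simp [hl]; simpa using hf
    · simp only [hl]
      cases pvB_mapLoop s l with
      | none => simpa using hf
      | some c => simp
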